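-- pv_equiv track=rewrite | github.com/VKBRAWLER/ROQE.py | ROQE 2.0.py | ter
-- ===== SOURCE A (Python) =====
-- def isnum(num):
--     try:
--         if "." in str(num):
--             if (int(str(num).split(".")[1])) == 0:
--                 return True
--             else:
--                 return False
--         else:
--             int(num)
--             return True
--     except ValueError:
--         return False
--
-- def ran(num):                        # creating range for all a,b1,b2,c to find thier factor in for loop
--     num = int(num)
--     if num < 0:
--         return (num*-1)+1
--     else:
--         return num+1
--
-- def factor(num):
--     factor_num = []
--     if isnum(num) == False:
--         n = len(str(num).split(".")[1])
--         num10 = num*(pow(10,n))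
--         num = int(num10)
--
--     for i in range(1,ran(num)):
--         if num%i == 0:
--             factor_num.append(-i)
--             factor_num.append(i)
--     return factor_num
--
-- def ter(num):
--     count = 0
--     for i in range (len(factor(num))):
--         j = factor(num)[i]
--         if j%5 == 0 or j%2 == 0 or j == 1 or j == -1:
--             count = count
--         else:
--             count += 1
--     if count >= 1:
--         return False
--     else:
--         return True
-- ===== SOURCE B (Python) =====
-- def ter(num):
--     n = abs(num)
--     if n == 0:
--         return True
--     while n % 2 == 0:
--         n //= 2
--     while n % 5 == 0:
--         n //= 5
--     return n == 1
-- ===== Notes on version B (the rewrite author's own statement) =====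
-- stated objective: faster
-- what changed: A enumerates all divisors of |num| (recomputing the full divisor list on every loop iteration) and counts those not equal to ±1 and not divisible by 2 or 5; B never builds the divisor list: it strips factors of 2 and 5 from |num| and checks whether 1 remains.
import Mathlib
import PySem

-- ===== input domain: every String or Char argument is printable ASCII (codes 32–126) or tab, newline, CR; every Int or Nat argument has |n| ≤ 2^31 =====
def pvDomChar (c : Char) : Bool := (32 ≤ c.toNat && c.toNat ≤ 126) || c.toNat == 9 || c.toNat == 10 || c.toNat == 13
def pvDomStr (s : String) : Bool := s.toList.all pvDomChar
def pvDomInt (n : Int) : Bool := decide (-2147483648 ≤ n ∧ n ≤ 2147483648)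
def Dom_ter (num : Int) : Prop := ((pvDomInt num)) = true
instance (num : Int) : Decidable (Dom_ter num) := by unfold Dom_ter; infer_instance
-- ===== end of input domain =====

-- B replaces A's repeated full divisor enumeration by stripping the factors 2 and 5 from |num| and testing whether 1 remains (objective: faster).

-- ===== PORT A =====
-- isnum: str(num) of an Int never contains '.', so the float branch (parsing the digits after '.') is
-- unreachable; it is ported as its literal test with the unreachable branch collapsed, and int(num) never raises for an Int.
def ter_isnum (num : Int) : Bool :=
  if PySem.Str.isIn "." (PySem.Int.toStr num) then
    false  -- unreachable for an Int argument
  else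
    true

def ter_ran (num : Int) : Int :=
  if num < 0 then num * (-1) + 1 else num + 1

def ter_factor (num : Int) : List Int :=
  -- 'if isnum(num) == False:' rescales a float argument by a power of 10; for an Int it is never taken (ported as the identity)
  let num := if ter_isnum num == false then num else num
  (PySem.List.pyRange 1 (ter_ran num) 1).foldl
    (fun factor_num i =>
      if PySem.Int.mod num i == 0 then (factor_num ++ [-i]) ++ [i] else factor_num)
    []

def ter (num : Int) : Bool :=
  let count : Int :=
    (PySem.List.pyRange 0 ((ter_factor num).length : Int) 1).foldl
      (fun count i =>
        let j := PySem.List.pyGetD (ter_factor num) i 0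
        if PySem.Int.mod j 5 == 0 || PySem.Int.mod j 2 == 0 || j == 1 || j == -1
        then count
        else count + 1)
      0
  if count ≥ 1 then false else true

-- ===== PORT B =====
-- 'while n % p == 0: n //= p' for p = 2 and p = 5 (the '0 < n' conjunct only makes the loop total; Source B reaches it with n ≥ 1)
def ter_strip (p n : Nat) : Nat :=
  if h : 0 < n ∧ 2 ≤ p ∧ n % p = 0 then ter_strip p (n / p) else n
termination_by n
decreasing_by exact Nat.div_lt_self h.1 (by omega)

def ter_alt (num : Int) : Bool :=
  let n := num.natAbs
  if n == 0 then true
  else ter_strip 5 (ter_strip 2 n) == 1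

-- ===== PRECONDITION & SPEC =====
def Spec_ter (num : Int) (out : Bool) : Prop := out = ter_alt num
instance (num : Int) (out : Bool) : Decidable (Spec_ter num out) := by unfold Spec_ter; infer_instance

-- ===== CLAIM (what is proved, stated in full; the proofs are below) =====
def Claim_equal_ter : Prop := ∀ (num : Int), Dom_ter num → Spec_ter num (ter num)

-- ===== LEMMAS AND PROOFS =====

-- A's inner condition on a factor j
def pvCond (j : Int) : Bool :=
  PySem.Int.mod j 5 == 0 || PySem.Int.mod j 2 == 0 || j == 1 || j == -1

lemma pv_ran_eq (num : Int) : ter_ran num = (num.natAbs : Int) + 1 := by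
  unfold ter_ran; split <;> omega

lemma pv_factor_eq (num : Int) :
    ter_factor num
      = (PySem.List.pyRange 1 (ter_ran num) 1).flatMap
          (fun i => if PySem.Int.mod num i = 0 then [-i, i] else []) := by
  unfold ter_factor
  simp only [beq_iff_eq, ite_self]
  have h : (fun (factor_num : List Int) i =>
      if PySem.Int.mod num i = 0 then (factor_num ++ [-i]) ++ [i] else factor_num)
      = (fun factor_num i => factor_num ++ (if PySem.Int.mod num i = 0 then [-i, i] else [])) := by
    funext acc i; split <;> simp
  rw [h, PySem.List.foldl_append_eq_flatMap]
  simp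

lemma pv_mem_factor (num : Int) (j : Int) :
    j ∈ ter_factor num ↔
      ∃ i : Int, (1 ≤ i ∧ i < ter_ran num) ∧ PySem.Int.mod num i = 0 ∧ (j = -i ∨ j = i) := by
  rw [pv_factor_eq]
  simp only [List.mem_flatMap, PySem.List.mem_pyRange_one]
  constructor
  · rintro ⟨i, hi, hj⟩
    by_cases h : PySem.Int.mod num i = 0
    · refine ⟨i, hi, h, ?_⟩
      simp [h] at hj
      tauto
    · simp [h] at hj
  · rintro ⟨i, hi, h, hj⟩
    exact ⟨i, hi, by simp [h]; tauto⟩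

lemma pv_ter_eq_all (num : Int) : ter num = (ter_factor num).all pvCond := by
  unfold ter
  rw [show (fun (count : Int) i =>
        let j := PySem.List.pyGetD (ter_factor num) i 0
        if PySem.Int.mod j 5 == 0 || PySem.Int.mod j 2 == 0 || j == 1 || j == -1
        then count else count + 1)
      = (fun (count : Int) i =>
          (fun (c : Int) (j : Int) => if (!pvCond j) = true then c + 1 else c) count
            (PySem.List.pyGetD (ter_factor num) i 0)) from by
    funext c i
    show (if pvCond (PySem.List.pyGetD (ter_factor num) i 0) = true then c else c + 1) = _
    cases hb : pvCond (PySem.List.pyGetD (ter_factor num) i 0) <;> simp [hb]]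
  rw [PySem.List.foldl_pyRange_zero_pyGetD' (ter_factor num) 0
        (fun (c : Int) (j : Int) => if (!pvCond j) = true then c + 1 else c) 0]
  rw [PySem.List.foldl_count_if (fun j => !pvCond j) (ter_factor num) 0]
  rcases Nat.eq_zero_or_pos ((ter_factor num).countP (fun j => !pvCond j)) with h | h
  · rw [h]
    rw [List.countP_eq_zero] at h
    simp only [zero_add, Int.natCast_zero]
    rw [if_neg (by omega)]
    symm
    rw [List.all_eq_true]
    intro j hj
    simpa using h j hj
  · rw [if_pos (by exact_mod_cast by omega)]
    symm
    simp only [List.all_eq_false]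
    rw [gt_iff_lt, List.countP_pos_iff] at h
    obtain ⟨j, hj, hc⟩ := h
    exact ⟨j, hj, by simpa using hc⟩

-- ter_strip facts
lemma pv_strip_dvd (p n : Nat) : ter_strip p n ∣ n := by
  fun_induction ter_strip p n with
  | case1 n h ih => exact ih.trans (Nat.div_dvd_of_dvd (Nat.dvd_of_mod_eq_zero h.2.2))
  | case2 n h => exact dvd_refl n

lemma pv_strip_pos (p n : Nat) (hn : 0 < n) : 0 < ter_strip p n := by
  fun_induction ter_strip p n with
  | case1 n h ih =>
      exact ih (Nat.div_pos (Nat.le_of_dvd h.1 (Nat.dvd_of_mod_eq_zero h.2.2)) (by omega))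
  | case2 n h => exact hn

lemma pv_strip_not_dvd (p n : Nat) (hp : 2 ≤ p) (hn : 0 < n) : ¬ p ∣ ter_strip p n := by
  fun_induction ter_strip p n with
  | case1 n h ih =>
      exact ih (Nat.div_pos (Nat.le_of_dvd h.1 (Nat.dvd_of_mod_eq_zero h.2.2)) (by omega))
  | case2 n h =>
      intro hd
      exact h ⟨hn, hp, Nat.eq_zero_of_dvd_of_lt (Nat.dvd_sub (dvd_refl p) hd) (by omega) ▸
        (Nat.mod_eq_zero_of_dvd hd)⟩

lemma pv_strip_dvd_of_coprime (p n d : Nat) (hc : Nat.Coprime d p) (hd : d ∣ n) :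
    d ∣ ter_strip p n := by
  fun_induction ter_strip p n with
  | case1 n h ih =>
      apply ih
      have hpn : p ∣ n := Nat.dvd_of_mod_eq_zero h.2.2
      have hdm : d ∣ n / p * p := by rw [Nat.div_mul_cancel hpn]; exact hd
      exact Nat.Coprime.dvd_of_dvd_mul_right hc hdm
  | case2 n h => exact hd

-- B's test characterised by divisors: strip(5, strip(2, n)) = 1 iff every positive divisor of n is even, a multiple of 5, or 1
lemma pv_key (n : Nat) (hn : 0 < n) :
    ter_strip 5 (ter_strip 2 n) = 1 ↔
      ∀ d : Nat, 0 < d → d ∣ n → (2 ∣ d ∨ 5 ∣ d ∨ d = 1) := by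
  constructor
  · intro h1 d _ hdn
    by_cases h2 : 2 ∣ d
    · exact Or.inl h2
    by_cases h5 : 5 ∣ d
    · exact Or.inr (Or.inl h5)
    right; right
    have hc2 : Nat.Coprime d 2 := (Nat.Prime.coprime_iff_not_dvd Nat.prime_two).mpr h2 |>.symm
    have hc5 : Nat.Coprime d 5 := (Nat.Prime.coprime_iff_not_dvd (by norm_num)).mpr h5 |>.symm
    have hd2 : d ∣ ter_strip 2 n := pv_strip_dvd_of_coprime 2 n d hc2 hdn
    have hdm : d ∣ ter_strip 5 (ter_strip 2 n) := pv_strip_dvd_of_coprime 5 _ d hc5 hd2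
    rw [h1] at hdm
    exact Nat.dvd_one.mp hdm
  · intro hall
    have h2pos : 0 < ter_strip 2 n := pv_strip_pos 2 n hn
    have hmn : ter_strip 5 (ter_strip 2 n) ∣ n := (pv_strip_dvd 5 _).trans (pv_strip_dvd 2 n)
    have hmpos : 0 < ter_strip 5 (ter_strip 2 n) := pv_strip_pos 5 _ h2pos
    have h5 : ¬ 5 ∣ ter_strip 5 (ter_strip 2 n) := pv_strip_not_dvd 5 _ (by omega) h2pos
    have h2 : ¬ 2 ∣ ter_strip 5 (ter_strip 2 n) := fun hd =>
      pv_strip_not_dvd 2 n (by omega) hn (hd.trans (pv_strip_dvd 5 _))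
    rcases hall _ hmpos hmn with h | h | h
    · exact absurd h h2
    · exact absurd h h5
    · exact h

lemma pv_cond_iff (d : Nat) (hd : 0 < d) (j : Int) (hj : j = (d : Int) ∨ j = -(d : Int)) :
    pvCond j = true ↔ (2 ∣ d ∨ 5 ∣ d ∨ d = 1) := by
  rcases hj with rfl | rfl <;>
    simp only [pvCond, Bool.or_eq_true, beq_iff_eq, PySem.Int.mod_eq_zero_iff_dvd] <;>
    omega

lemma pv_all_iff (num : Int) (hn : num.natAbs ≠ 0) :
    ((ter_factor num).all pvCond = true) ↔ ter_strip 5 (ter_strip 2 num.natAbs) = 1 := by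
  rw [List.all_eq_true, pv_key num.natAbs (by omega)]
  constructor
  · intro h d hd hdn
    have hle : d ≤ num.natAbs := Nat.le_of_dvd (by omega) hdn
    have hdvd : (d : Int) ∣ num := by
      have h1 : (d : Int) ∣ (num.natAbs : Int) := Int.natCast_dvd_natCast.mpr hdn
      exact h1.trans (Int.natAbs_dvd.mpr dvd_rfl)
    have hmem : (d : Int) ∈ ter_factor num := by
      rw [pv_mem_factor]
      exact ⟨(d : Int), ⟨by omega, by rw [pv_ran_eq]; omega⟩,
        (PySem.Int.mod_eq_zero_iff_dvd num d).mpr hdvd, Or.inr rfl⟩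
    exact (pv_cond_iff d hd _ (Or.inl rfl)).mp (h _ hmem)
  · intro hall j hj
    rw [pv_mem_factor] at hj
    obtain ⟨i, ⟨hi1, _⟩, hmod, hji⟩ := hj
    have hipos : 0 < i.natAbs := by omega
    have hidvd : i.natAbs ∣ num.natAbs :=
      Int.natAbs_dvd_natAbs.mpr ((PySem.Int.mod_eq_zero_iff_dvd num i).mp hmod)
    have hcast : (i.natAbs : Int) = i := by omega
    refine (pv_cond_iff i.natAbs hipos j ?_).mpr (hall i.natAbs hipos hidvd)
    rcases hji with rfl | rfl
    · right; rw [hcast]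
    · left; rw [hcast]

lemma pv_main (num : Int) : ter num = ter_alt num := by
  by_cases hn : num.natAbs = 0
  · have h0 : num = 0 := by omega
    subst h0; decide
  · rw [pv_ter_eq_all]
    show _ = ter_alt num
    unfold ter_alt
    rw [if_neg (by simpa using hn)]
    by_cases h1 : ter_strip 5 (ter_strip 2 num.natAbs) = 1
    · simp [h1, (pv_all_iff num hn).mpr h1]
    · have hna : ¬ ((ter_factor num).all pvCond = true) := fun hh => h1 ((pv_all_iff num hn).mp hh)
      rw [Bool.not_eq_true] at hna
      rw [hna]
      symm
      rw [beq_eq_false_iff_ne]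
      exact h1

-- ===== VERDICT (by name: the statement is the Claim_ definition above) =====
theorem ter_spec : Claim_equal_ter := by
  intro num _
  unfold Spec_ter
  exact pv_main num
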